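-- pv_equiv track=rewrite | github.com/nicklasorte/spectrum-systems | spectrum_systems/modules/runtime/repair_prompt_generator.py | _default_validation_commands
-- ===== SOURCE A (Python) =====
-- from typing import Any
--
-- def _default_validation_commands(diagnosis_artifact: dict[str, Any], root_cause: str) -> list[str]:
--     commands = [
--         cmd.strip()
--         for cmd in diagnosis_artifact.get("expected_validation_commands", [])
--         if isinstance(cmd, str) and cmd.strip()
--     ]
--     if not commands:
--         commands.append("pytest tests/test_repair_prompt_generator.py -q")
--
--     if root_cause in {
--         "schema_example_drift",
--         "manifest_or_registry_mismatch",
--         "missing_required_surface",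
--         "control_surface_input_missing",
--         "source_authority_anchor_gap",
--         "certification_surface_gap",
--         "policy_composition_gap",
--         "corroboration_validation_gap",
--         "override_temporal_validation_gap",
--     } and "python scripts/run_contract_enforcement.py" not in commands:
--         commands.append("python scripts/run_contract_enforcement.py")
--
--     if root_cause in {"control_surface_input_missing", "invariant_violation"} and (
--         "python scripts/run_contract_preflight.py --output-dir outputs/contract_preflight" not in commands
--     ):
--         commands.append("python scripts/run_contract_preflight.py --output-dir outputs/contract_preflight")
--
--     return sorted(dict.fromkeys(commands))
-- ===== SOURCE B (Python) =====
-- _DEFAULT = "pytest tests/test_repair_prompt_generator.py -q"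
-- _ENFORCEMENT = "python scripts/run_contract_enforcement.py"
-- _PREFLIGHT = "python scripts/run_contract_preflight.py --output-dir outputs/contract_preflight"
--
-- _ENFORCEMENT_CAUSES = {
--     "schema_example_drift",
--     "manifest_or_registry_mismatch",
--     "missing_required_surface",
--     "control_surface_input_missing",
--     "source_authority_anchor_gap",
--     "certification_surface_gap",
--     "policy_composition_gap",
--     "corroboration_validation_gap",
--     "override_temporal_validation_gap",
-- }
-- _PREFLIGHT_CAUSES = {"control_surface_input_missing", "invariant_violation"}
--
--
-- def _insort_unique(cmds, cmd):
--     """Insert cmd into the sorted, duplicate-free list cmds, keeping it sorted and duplicate-free."""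
--     i = 0
--     while i < len(cmds) and cmds[i] < cmd:
--         i += 1
--     if i == len(cmds) or cmds[i] != cmd:
--         cmds.insert(i, cmd)
--
--
-- def _default_validation_commands(diagnosis_artifact, root_cause):
--     # Maintain a sorted, duplicate-free list throughout instead of appending
--     # everything and sorting/deduplicating at the end.
--     result = []
--     for cmd in diagnosis_artifact.get("expected_validation_commands", []):
--         if isinstance(cmd, str):
--             c = cmd.strip()
--             if c:
--                 _insort_unique(result, c)
--     if not result:
--         _insort_unique(result, _DEFAULT)
--     if root_cause in _ENFORCEMENT_CAUSES:
--         _insort_unique(result, _ENFORCEMENT)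
--     if root_cause in _PREFLIGHT_CAUSES:
--         _insort_unique(result, _PREFLIGHT)
--     return result
-- ===== Notes on version B (the rewrite author's own statement) =====
-- stated objective: alternative
-- what changed: B maintains one sorted, duplicate-free result list by ordered insertion (insort-with-dedup) as commands arrive, instead of A's pipeline of appending everything with not-in guards and then sorting dict.fromkeys at the end.
import Mathlib
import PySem

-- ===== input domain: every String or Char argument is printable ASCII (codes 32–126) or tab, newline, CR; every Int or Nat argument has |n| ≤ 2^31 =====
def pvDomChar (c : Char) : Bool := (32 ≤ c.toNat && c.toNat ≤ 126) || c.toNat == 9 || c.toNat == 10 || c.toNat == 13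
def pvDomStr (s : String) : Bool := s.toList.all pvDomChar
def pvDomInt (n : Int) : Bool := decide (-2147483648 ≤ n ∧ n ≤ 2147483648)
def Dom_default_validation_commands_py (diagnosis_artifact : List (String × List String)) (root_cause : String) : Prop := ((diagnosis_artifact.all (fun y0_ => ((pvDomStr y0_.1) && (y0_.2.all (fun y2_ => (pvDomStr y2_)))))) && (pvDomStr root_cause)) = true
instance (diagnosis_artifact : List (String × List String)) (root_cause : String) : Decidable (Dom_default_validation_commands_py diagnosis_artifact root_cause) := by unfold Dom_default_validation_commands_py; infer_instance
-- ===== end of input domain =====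

-- B maintains a sorted, duplicate-free list via ordered insertion throughout, instead of
-- A's append-everything-then-sorted(dict.fromkeys(...)) pipeline (alternative decomposition).

-- ===== PORT A =====
def default_validation_commands_py (diagnosis_artifact : List (String × List String)) (root_cause : String) : List String :=
  -- commands = [cmd.strip() for cmd in …get(…, []) if isinstance(cmd, str) and cmd.strip()]
  let commands : List String :=
    (PySem.Dict.getD ⟨diagnosis_artifact⟩ "expected_validation_commands" []).foldl
      (fun acc cmd => if PySem.Str.strip cmd ≠ "" then acc ++ [PySem.Str.strip cmd] else acc) []
  -- if not commands: commands.append(...)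
  let commands := if commands = [] then commands ++ ["pytest tests/test_repair_prompt_generator.py -q"] else commands
  -- first guarded append
  let commands :=
    if root_cause ∈ ["schema_example_drift", "manifest_or_registry_mismatch",
        "missing_required_surface", "control_surface_input_missing",
        "source_authority_anchor_gap", "certification_surface_gap",
        "policy_composition_gap", "corroboration_validation_gap",
        "override_temporal_validation_gap"] ∧
        "python scripts/run_contract_enforcement.py" ∉ commands
    then commands ++ ["python scripts/run_contract_enforcement.py"] else commands
  -- second guarded append
  let commands :=
    if root_cause ∈ ["control_surface_input_missing", "invariant_violation"] ∧
        "python scripts/run_contract_preflight.py --output-dir outputs/contract_preflight" ∉ commands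
    then commands ++ ["python scripts/run_contract_preflight.py --output-dir outputs/contract_preflight"]
    else commands
  -- return sorted(dict.fromkeys(commands))
  PySem.List.sorted (PySem.List.dedup commands) (fun x => x) false

-- ===== PORT B =====
-- _insort_unique: linear scan to the insertion point, skip if already present
def pvInsortUnique (cmds : List String) (cmd : String) : List String :=
  match cmds with
  | [] => [cmd]
  | x :: rest =>
    if x < cmd then x :: pvInsortUnique rest cmd
    else if x = cmd then x :: rest
    else cmd :: x :: rest

def default_validation_commands_py_alt (diagnosis_artifact : List (String × List String)) (root_cause : String) : List String :=
  -- for cmd in …get(…, []): c = cmd.strip(); if c: _insort_unique(result, c)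
  let result : List String :=
    (PySem.Dict.getD ⟨diagnosis_artifact⟩ "expected_validation_commands" []).foldl
      (fun acc cmd => if PySem.Str.strip cmd ≠ "" then pvInsortUnique acc (PySem.Str.strip cmd) else acc) []
  -- if not result: _insort_unique(result, _DEFAULT)
  let result := if result = [] then pvInsortUnique result "pytest tests/test_repair_prompt_generator.py -q" else result
  -- if root_cause in _ENFORCEMENT_CAUSES: _insort_unique(result, _ENFORCEMENT)
  let result :=
    if root_cause ∈ ["schema_example_drift", "manifest_or_registry_mismatch",
        "missing_required_surface", "control_surface_input_missing",
        "source_authority_anchor_gap", "certification_surface_gap",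
        "policy_composition_gap", "corroboration_validation_gap",
        "override_temporal_validation_gap"]
    then pvInsortUnique result "python scripts/run_contract_enforcement.py" else result
  -- if root_cause in _PREFLIGHT_CAUSES: _insort_unique(result, _PREFLIGHT)
  let result :=
    if root_cause ∈ ["control_surface_input_missing", "invariant_violation"]
    then pvInsortUnique result "python scripts/run_contract_preflight.py --output-dir outputs/contract_preflight"
    else result
  result

-- ===== PRECONDITION & SPEC =====
def Spec_default_validation_commands_py (diagnosis_artifact : List (String × List String)) (root_cause : String) (out : List String) : Prop := out = default_validation_commands_py_alt diagnosis_artifact root_cause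
instance (diagnosis_artifact : List (String × List String)) (root_cause : String) (out : List String) : Decidable (Spec_default_validation_commands_py diagnosis_artifact root_cause out) := by unfold Spec_default_validation_commands_py; infer_instance

-- ===== CLAIM (what is proved, stated in full; the proofs are below) =====
def Claim_equal_default_validation_commands_py : Prop := ∀ (diagnosis_artifact : List (String × List String)) (root_cause : String), Dom_default_validation_commands_py diagnosis_artifact root_cause → Spec_default_validation_commands_py diagnosis_artifact root_cause (default_validation_commands_py diagnosis_artifact root_cause)

-- ===== LEMMAS AND PROOFS =====

lemma mem_insortUnique (l : List String) (c x : String) :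
    x ∈ pvInsortUnique l c ↔ x = c ∨ x ∈ l := by
  induction l with
  | nil => simp [pvInsortUnique]
  | cons y rest ih =>
    simp only [pvInsortUnique]
    split_ifs with h1 h2 <;> simp_all <;> tauto

lemma insortUnique_ne_nil (l : List String) (c : String) : pvInsortUnique l c ≠ [] := by
  cases l with
  | nil => simp [pvInsortUnique]
  | cons y rest => simp only [pvInsortUnique]; split_ifs <;> simp

lemma pairwise_insortUnique (l : List String) (c : String)
    (h : l.Pairwise (· < ·)) : (pvInsortUnique l c).Pairwise (· < ·) := by
  induction l with
  | nil => simp [pvInsortUnique]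
  | cons y rest ih =>
    rw [List.pairwise_cons] at h
    simp only [pvInsortUnique]
    split_ifs with h1 h2
    · rw [List.pairwise_cons]
      refine ⟨fun z hz => ?_, ih h.2⟩
      rcases (mem_insortUnique rest c z).mp hz with rfl | hz
      · exact h1
      · exact h.1 z hz
    · exact List.pairwise_cons.mpr h
    · have hcy : c < y := lt_of_le_of_ne (not_lt.mp h1) (Ne.symm h2)
      rw [List.pairwise_cons]
      refine ⟨fun z hz => ?_, List.pairwise_cons.mpr h⟩
      rcases List.mem_cons.mp hz with rfl | hz
      · exact hcy
      · exact lt_trans hcy (h.1 z hz)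

lemma nodup_insort_fold (l acc : List String) (hacc : acc.Pairwise (· < ·)) :
    (l.foldl (fun acc cmd => if PySem.Str.strip cmd ≠ "" then pvInsortUnique acc (PySem.Str.strip cmd) else acc) acc).Pairwise (· < ·) := by
  induction l generalizing acc with
  | nil => exact hacc
  | cons cmd rest ih =>
    simp only [List.foldl_cons]
    split_ifs with h
    · exact ih _ (pairwise_insortUnique _ _ hacc)
    · exact ih _ hacc

lemma mem_insort_fold (l acc : List String) (x : String) :
    x ∈ l.foldl (fun acc cmd => if PySem.Str.strip cmd ≠ "" then pvInsortUnique acc (PySem.Str.strip cmd) else acc) acc ↔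
      x ∈ acc ∨ ∃ cmd ∈ l, PySem.Str.strip cmd ≠ "" ∧ x = PySem.Str.strip cmd := by
  induction l generalizing acc with
  | nil => simp
  | cons cmd rest ih =>
    simp only [List.foldl_cons]
    split_ifs with h
    · rw [ih, mem_insortUnique]
      constructor
      · rintro ((rfl | hx) | ⟨c, hc, hne, rfl⟩)
        · exact Or.inr ⟨cmd, by simp, h, rfl⟩
        · exact Or.inl hx
        · exact Or.inr ⟨c, by simp [hc], hne, rfl⟩
      · rintro (hx | ⟨c, hc, hne, rfl⟩)
        · exact Or.inl (Or.inr hx)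
        · rcases List.mem_cons.mp hc with rfl | hc
          · exact Or.inl (Or.inl rfl)
          · exact Or.inr ⟨c, hc, hne, rfl⟩
    · rw [ih]
      push_neg at h
      constructor
      · rintro (hx | ⟨c, hc, hne, rfl⟩)
        · exact Or.inl hx
        · exact Or.inr ⟨c, by simp [hc], hne, rfl⟩
      · rintro (hx | ⟨c, hc, hne, rfl⟩)
        · exact Or.inl hx
        · rcases List.mem_cons.mp hc with rfl | hc
          · exact absurd h hne
          · exact Or.inr ⟨c, hc, hne, rfl⟩

lemma insort_fold_eq_nil (l acc : List String) :
    l.foldl (fun acc cmd => if PySem.Str.strip cmd ≠ "" then pvInsortUnique acc (PySem.Str.strip cmd) else acc) acc = [] ↔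
      acc = [] ∧ ∀ cmd ∈ l, PySem.Str.strip cmd = "" := by
  induction l generalizing acc with
  | nil => simp
  | cons cmd rest ih =>
    simp only [List.foldl_cons]
    split_ifs with h
    · rw [ih]
      simp only [insortUnique_ne_nil, false_and, false_iff, not_and]
      intro _ hall
      exact absurd (hall cmd (by simp)) h
    · rw [ih]
      push_neg at h
      constructor
      · rintro ⟨rfl, hall⟩
        exact ⟨rfl, fun c hc => by rcases List.mem_cons.mp hc with rfl | hc; exact h; exact hall c hc⟩
      · rintro ⟨rfl, hall⟩
        exact ⟨rfl, fun c hc => hall c (by simp [hc])⟩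

lemma mem_append_fold (l acc : List String) (x : String) :
    x ∈ l.foldl (fun acc cmd => if PySem.Str.strip cmd ≠ "" then acc ++ [PySem.Str.strip cmd] else acc) acc ↔
      x ∈ acc ∨ ∃ cmd ∈ l, PySem.Str.strip cmd ≠ "" ∧ x = PySem.Str.strip cmd := by
  induction l generalizing acc with
  | nil => simp
  | cons cmd rest ih =>
    simp only [List.foldl_cons]
    split_ifs with h
    · rw [ih]
      simp only [List.mem_append, List.mem_singleton]
      constructor
      · rintro ((hx | rfl) | ⟨c, hc, hne, rfl⟩)
        · exact Or.inl hx
        · exact Or.inr ⟨cmd, by simp, h, rfl⟩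
        · exact Or.inr ⟨c, by simp [hc], hne, rfl⟩
      · rintro (hx | ⟨c, hc, hne, rfl⟩)
        · exact Or.inl (Or.inl hx)
        · rcases List.mem_cons.mp hc with rfl | hc
          · exact Or.inl (Or.inr rfl)
          · exact Or.inr ⟨c, hc, hne, rfl⟩
    · rw [ih]
      push_neg at h
      constructor
      · rintro (hx | ⟨c, hc, hne, rfl⟩)
        · exact Or.inl hx
        · exact Or.inr ⟨c, by simp [hc], hne, rfl⟩
      · rintro (hx | ⟨c, hc, hne, rfl⟩)
        · exact Or.inl hx
        · rcases List.mem_cons.mp hc with rfl | hc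
          · exact absurd h hne
          · exact Or.inr ⟨c, hc, hne, rfl⟩

lemma append_fold_eq_nil (l acc : List String) :
    l.foldl (fun acc cmd => if PySem.Str.strip cmd ≠ "" then acc ++ [PySem.Str.strip cmd] else acc) acc = [] ↔
      acc = [] ∧ ∀ cmd ∈ l, PySem.Str.strip cmd = "" := by
  induction l generalizing acc with
  | nil => simp
  | cons cmd rest ih =>
    simp only [List.foldl_cons]
    split_ifs with h
    · rw [ih]
      simp only [List.append_eq_nil_iff, List.cons_ne_nil, and_false, false_and, false_iff, not_and]
      intro _ hall
      exact absurd (hall cmd (by simp)) h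
    · rw [ih]
      push_neg at h
      constructor
      · rintro ⟨rfl, hall⟩
        exact ⟨rfl, fun c hc => by rcases List.mem_cons.mp hc with rfl | hc; exact h; exact hall c hc⟩
      · rintro ⟨rfl, hall⟩
        exact ⟨rfl, fun c hc => hall c (by simp [hc])⟩

lemma mem_append_default {P : Prop} [Decidable P] (c : List String) (y x : String) :
    x ∈ (if P then c ++ [y] else c) ↔ x ∈ c ∨ (P ∧ x = y) := by
  split_ifs with hp <;> simp [hp]

lemma mem_insort_guard {P : Prop} [Decidable P] (c : List String) (y x : String) :
    x ∈ (if P then pvInsortUnique c y else c) ↔ x ∈ c ∨ (P ∧ x = y) := by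
  split_ifs with hp <;> simp [mem_insortUnique, hp] <;> tauto

lemma pairwise_insort_guard {P : Prop} [Decidable P] (c : List String) (y : String)
    (h : c.Pairwise (· < ·)) : (if P then pvInsortUnique c y else c).Pairwise (· < ·) := by
  split_ifs
  · exact pairwise_insortUnique _ _ h
  · exact h

-- ===== VERDICT (by name: the statement is the Claim_ definition above) =====
set_option maxHeartbeats 1000000 in
theorem default_validation_commands_py_spec : Claim_equal_default_validation_commands_py := by
  intro d rc _
  unfold Spec_default_validation_commands_py default_validation_commands_py default_validation_commands_py_alt
  simp only [PySem.List.dedup_eq_ofList]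
  set l := PySem.Dict.getD (⟨d⟩ : PySem.Dict String (List String)) "expected_validation_commands" [] with hl
  set fA := l.foldl (fun acc cmd => if PySem.Str.strip cmd ≠ "" then acc ++ [PySem.Str.strip cmd] else acc) [] with hfA
  set fB := l.foldl (fun acc cmd => if PySem.Str.strip cmd ≠ "" then pvInsortUnique acc (PySem.Str.strip cmd) else acc) [] with hfB
  have hmem : ∀ x, x ∈ fB ↔ x ∈ fA := by
    intro x; rw [hfA, hfB, mem_insort_fold, mem_append_fold]
  have hnil : (fB = []) ↔ (fA = []) := by
    rw [hfA, hfB, insort_fold_eq_nil, append_fold_eq_nil]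
  have hpw : fB.Pairwise (· < ·) := by
    rw [hfB]; exact nodup_insort_fold _ _ (by simp)
  clear_value fA fB
  clear hfA hfB hl
  have hpwB : (if rc ∈ ["control_surface_input_missing", "invariant_violation"] then
      pvInsortUnique
        (if rc ∈ ["schema_example_drift", "manifest_or_registry_mismatch", "missing_required_surface",
            "control_surface_input_missing", "source_authority_anchor_gap", "certification_surface_gap",
            "policy_composition_gap", "corroboration_validation_gap", "override_temporal_validation_gap"] then
          pvInsortUnique (if fB = [] then pvInsortUnique fB "pytest tests/test_repair_prompt_generator.py -q" else fB)
            "python scripts/run_contract_enforcement.py"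
        else if fB = [] then pvInsortUnique fB "pytest tests/test_repair_prompt_generator.py -q" else fB)
        "python scripts/run_contract_preflight.py --output-dir outputs/contract_preflight"
    else if rc ∈ ["schema_example_drift", "manifest_or_registry_mismatch", "missing_required_surface",
            "control_surface_input_missing", "source_authority_anchor_gap", "certification_surface_gap",
            "policy_composition_gap", "corroboration_validation_gap", "override_temporal_validation_gap"] then
        pvInsortUnique (if fB = [] then pvInsortUnique fB "pytest tests/test_repair_prompt_generator.py -q" else fB)
          "python scripts/run_contract_enforcement.py"
      else if fB = [] then pvInsortUnique fB "pytest tests/test_repair_prompt_generator.py -q" else fB).Pairwise (· < ·) := by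
    apply pairwise_insort_guard
    apply pairwise_insort_guard
    exact pairwise_insort_guard _ _ hpw
  apply PySem.List.sorted_eq_of_perm_of_pairwise_lt
  · refine (List.perm_ext_iff_of_nodup (List.Pairwise.imp (fun h => ne_of_lt h) hpwB)
      (PySem.Set.nodup_ofList _)).mpr ?_
    intro x
    rw [PySem.Set.mem_ofList]
    simp only [mem_insort_guard, mem_append_default]
    have hm := hmem x
    by_cases hx1 : x = "python scripts/run_contract_enforcement.py" <;>
      by_cases hx2 : x = "python scripts/run_contract_preflight.py --output-dir outputs/contract_preflight" <;>
      by_cases h1 : "python scripts/run_contract_enforcement.py" ∈ fA <;>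
      by_cases h2 : "python scripts/run_contract_preflight.py --output-dir outputs/contract_preflight" ∈ fA <;>
      by_cases hB : fB = [] <;> by_cases hA : fA = [] <;> simp_all
  · exact hpwB
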